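-- pv_equiv track=rewrite | github.com/Josecontis/opinion_target_extraction | ProgettoTesi/src/processing_data_to_target_polarity.py | listaPolarity_from_listaTargetPolarity
-- ===== SOURCE A (Python) =====
-- from operator import itemgetter
--
-- def listaPolarity_from_listaTargetPolarity(list_target_polarity):
--     lista_polarity = [] # lista vuota che conterrà le polarità
--     for kk in list_target_polarity: # itero su [es. list_target_polarity=('buono', '+3]'),('bello','+2]')... ]
--         lista_polarity_tmp = [] # creo lista temporanea per contenere le polarità di una singola frase
--         for ind1 in kk: # itero su [es. considero KK=('buono', '+3]') in ind1 0]
--             index = 1 # -no sense-------?????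
--             if len(ind1) > index: # controllo sulla lunghezza del termine target che se > 1 allora mi salvo la polarità
--                 b = itemgetter(1)(ind1) # salva in b la polarità in posizione ind1
--                 lista_polarity_tmp.append(b) # concateno alla lista
--             else: # in questo caso significa che non c'è la polarità
--                 lista_polarity_tmp.append('NA1') # quindi nella lista inserisco 'NA1'
--         lista_polarity.append(lista_polarity_tmp) # la lista delle polarità di tutte le frasi
--
--     # procedimento per eliminare le parentesi
--     lista_polarity_process = []
--     for jj in lista_polarity: # per ogni polarità [es. lista_polarity=(+3]),(+2])..]
--         lista_polarity_process_tmp = []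
--         for jjj in jj: # per ogni polarità
--             if (jjj.__contains__(']')): # se contiene la parentesi ]
--                 x = jjj.replace("]", "") # elimino la parentesi ]
--                 lista_polarity_process_tmp.append(x) # inserisco nella lista temporanea il risultato [es. +3,+2...]
--             else: # altrimenti significa che è già nella forma giusta da poterlo inserire nella lista
--                 lista_polarity_process_tmp.append(jjj)
--         lista_polarity_process.append(lista_polarity_process_tmp) # inserisco la lista di polarità corrette di UNA frase nella lista finale
--     return lista_polarity_process # restituisco la lista delle polarità di TUTTE le frasi
-- ===== SOURCE B (Python) =====
-- def listaPolarity_from_listaTargetPolarity(list_target_polarity):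
--     # single fused pass: unpack the pair and strip ']' immediately
--     return [[p.replace("]", "") if "]" in p else p for (_, p) in kk]
--             for kk in list_target_polarity]
-- ===== Notes on version B (the rewrite author's own statement) =====
-- stated objective: simpler
-- what changed: Fuses A's two sequential nested loops (extract-then-strip over a fully materialized intermediate list) into one nested comprehension that unpacks each pair and strips ']' in a single pass, with no intermediate structure and no itemgetter/len guard.
import Mathlib
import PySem

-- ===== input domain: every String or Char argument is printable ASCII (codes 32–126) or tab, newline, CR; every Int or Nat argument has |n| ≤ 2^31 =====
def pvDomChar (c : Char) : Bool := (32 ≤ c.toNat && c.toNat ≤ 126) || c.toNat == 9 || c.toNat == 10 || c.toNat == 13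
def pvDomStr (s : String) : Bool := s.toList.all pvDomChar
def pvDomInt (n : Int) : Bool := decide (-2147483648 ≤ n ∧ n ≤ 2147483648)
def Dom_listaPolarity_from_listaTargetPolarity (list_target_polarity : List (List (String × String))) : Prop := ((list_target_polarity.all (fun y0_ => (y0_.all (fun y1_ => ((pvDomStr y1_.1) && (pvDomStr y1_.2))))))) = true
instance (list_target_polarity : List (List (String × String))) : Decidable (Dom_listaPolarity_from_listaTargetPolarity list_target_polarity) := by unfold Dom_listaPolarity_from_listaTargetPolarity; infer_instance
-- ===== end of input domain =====

-- ===== PORT A =====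
-- Transliteration of A: first loop extracts element 1 (pairs always have len 2 > 1,
-- so the 'NA1' else-branch is written but dead on this type), second loop strips ']'.
def listaPolarity_from_listaTargetPolarity (list_target_polarity : List (List (String × String))) : List (List String) :=
  let lista_polarity : List (List String) :=
    list_target_polarity.foldl (fun lista_polarity kk =>
      let lista_polarity_tmp : List String :=
        kk.foldl (fun lista_polarity_tmp ind1 =>
          let index := 1
          if 2 > index then  -- len(ind1) = 2 for a pair
            let b := ind1.2  -- itemgetter(1)(ind1)
            lista_polarity_tmp ++ [b]
          else
            lista_polarity_tmp ++ ["NA1"]) []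
      lista_polarity ++ [lista_polarity_tmp]) []
  let lista_polarity_process : List (List String) :=
    lista_polarity.foldl (fun lista_polarity_process jj =>
      let lista_polarity_process_tmp : List String :=
        jj.foldl (fun lista_polarity_process_tmp jjj =>
          if PySem.Str.isIn "]" jjj then
            let x := PySem.Str.replace jjj "]" ""
            lista_polarity_process_tmp ++ [x]
          else
            lista_polarity_process_tmp ++ [jjj]) []
      lista_polarity_process ++ [lista_polarity_process_tmp]) []
  lista_polarity_process

-- ===== PORT B =====
-- B: one fused pass, a nested map unpacking the pair and stripping ']' immediately.
def listaPolarity_from_listaTargetPolarity_alt (list_target_polarity : List (List (String × String))) : List (List String) :=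
  list_target_polarity.map (fun kk =>
    kk.map (fun pr =>
      let p := pr.2
      if PySem.Str.isIn "]" p then PySem.Str.replace p "]" "" else p))

-- ===== PRECONDITION & SPEC =====
def Spec_listaPolarity_from_listaTargetPolarity (list_target_polarity : List (List (String × String))) (out : List (List String)) : Prop := out = listaPolarity_from_listaTargetPolarity_alt list_target_polarity
instance (list_target_polarity : List (List (String × String))) (out : List (List String)) : Decidable (Spec_listaPolarity_from_listaTargetPolarity list_target_polarity out) := by unfold Spec_listaPolarity_from_listaTargetPolarity; infer_instance

-- ===== CLAIM (what is proved, stated in full; the proofs are below) =====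
def Claim_equal_listaPolarity_from_listaTargetPolarity : Prop := ∀ (list_target_polarity : List (List (String × String))), Dom_listaPolarity_from_listaTargetPolarity list_target_polarity → Spec_listaPolarity_from_listaTargetPolarity list_target_polarity (listaPolarity_from_listaTargetPolarity list_target_polarity)

-- ===== LEMMAS AND PROOFS =====
theorem pv_foldl_push {α β : Type} (f : α → β) (l : List α) (acc : List β) :
    l.foldl (fun a x => a ++ [f x]) acc = acc ++ l.map f := by
  induction l generalizing acc with
  | nil => simp
  | cons x xs ih => simp [List.foldl, ih]

theorem pv_foldl_push_if {α β : Type} (c : α → Bool) (f g : α → β) (l : List α) (acc : List β) :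
    l.foldl (fun a x => if c x then a ++ [f x] else a ++ [g x]) acc
      = acc ++ l.map (fun x => if c x then f x else g x) := by
  induction l generalizing acc with
  | nil => simp
  | cons x xs ih => simp only [List.foldl, List.map]; rw [ih]; by_cases h : c x <;> simp [h]

-- ===== VERDICT (by name: the statement is the Claim_ definition above) =====
theorem listaPolarity_from_listaTargetPolarity_spec : Claim_equal_listaPolarity_from_listaTargetPolarity := by
  intro l _
  unfold Spec_listaPolarity_from_listaTargetPolarity
  unfold listaPolarity_from_listaTargetPolarity listaPolarity_from_listaTargetPolarity_alt
  simp only [show (2 : Nat) > 1 from by omega, if_true]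
  rw [show (fun (a : List String) (x : String × String) => a ++ [x.2]) =
        (fun a x => if (fun (_ : String × String) => true) x then a ++ [x.2] else a ++ ["NA1"]) from rfl]
  simp only [pv_foldl_push_if, pv_foldl_push, List.nil_append, if_true, List.map_map]
  apply List.map_congr_left
  intro kk _
  simp [Function.comp]
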